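-- pv_equiv track=rewrite | github.com/monkeysHK/BuildModuleNetwork | src/buildnetwork.py | findNodeLevels
-- ===== SOURCE A (Python) =====
-- def findNodeLevels(usesRelationsMap: dict[str, list[str]], externalPages: list[str]) -> dict[str, int]:
--     nodeLevels: dict[str, int] = {}
--
--     def findLevel(node: str, visiting: set[str]):
--         if node in nodeLevels:
--             return nodeLevels[node]
--         if node in visiting:
--             raise ValueError(f"Cycle detected at node: {node}")
--
--         visiting.add(node)
--         try:
--             if node in externalPages:
--                 level = -1 # External modules
--             elif len(usesRelationsMap[node]) == 0:
--                 level = 0 # Leaf nodes (no dependencies)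
--             else:
--                 level = max(findLevel(dep, visiting) for dep in usesRelationsMap[node]) + 1
--             nodeLevels[node] = level
--             return level
--         finally:
--             visiting.remove(node)
--
--     for node in usesRelationsMap.keys():
--         findLevel(node, set())
--
--     return nodeLevels
-- ===== SOURCE B (Python) =====
-- def findNodeLevels(usesRelationsMap: dict[str, list[str]], externalPages: list[str]) -> dict[str, int]:
--     # Phase 1: DFS recording only the finish (topological) order of nodes.
--     order: list[str] = []
--     done: set[str] = set()
--
--     def visit(n: str):
--         if n in done:
--             return
--         if n not in externalPages:
--             for d in usesRelationsMap[n]: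
--                 visit(d)
--         done.add(n)
--         order.append(n)
--
--     for k in usesRelationsMap:
--         visit(k)
--
--     # Phase 2: assign levels in finish order; every dependency is already levelled.
--     levels: dict[str, int] = {}
--     for n in order:
--         if n in externalPages:
--             levels[n] = -1
--         elif not usesRelationsMap[n]:
--             levels[n] = 0
--         else:
--             levels[n] = max(levels[d] for d in usesRelationsMap[n]) + 1
--     return levels
-- ===== Notes on version B (the rewrite author's own statement) =====
-- stated objective: alternative
-- what changed: A computes each level inside one memoized recursive DFS; B decomposes the job into two phases: a DFS that records only the finish (topological) order of the nodes, then a single linear scan that assigns levels in that order (every dependency is already levelled when its dependent is reached), producing the same dict in the same insertion order.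
import Mathlib
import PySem

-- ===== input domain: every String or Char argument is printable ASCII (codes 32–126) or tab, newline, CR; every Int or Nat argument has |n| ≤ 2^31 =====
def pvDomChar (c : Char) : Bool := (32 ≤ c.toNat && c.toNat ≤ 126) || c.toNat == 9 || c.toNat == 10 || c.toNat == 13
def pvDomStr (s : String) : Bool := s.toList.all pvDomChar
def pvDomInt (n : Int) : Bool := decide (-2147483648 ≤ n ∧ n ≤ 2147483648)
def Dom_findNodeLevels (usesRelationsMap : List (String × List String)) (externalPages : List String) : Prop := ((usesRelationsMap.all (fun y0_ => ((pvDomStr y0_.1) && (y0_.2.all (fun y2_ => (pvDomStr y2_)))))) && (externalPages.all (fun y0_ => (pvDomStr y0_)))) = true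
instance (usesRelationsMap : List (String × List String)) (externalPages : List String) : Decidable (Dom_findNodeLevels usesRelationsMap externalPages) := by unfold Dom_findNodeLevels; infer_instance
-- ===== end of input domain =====

-- B replaces A's inline memoized recursive level computation by two phases — a DFS that only
-- records the finish (topological) order, then one linear scan assigning levels in that order —
-- same cost, different decomposition (objective: alternative).

-- ===== PORT A =====
-- shared exact dict primitives: first-match lookup, assignment = overwrite in place else append
def pvLookup {α : Type} : List (String × α) → String → Option α
  | [], _ => none
  | (k, v) :: t, n => if k = n then some v else pvLookup t n

def pvInsert {α : Type} : List (String × α) → String → α → List (String × α)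
  | [], k, v => [(k, v)]
  | (k', v') :: t, k, v => if k' = k then (k, v) :: t else (k', v') :: pvInsert t k v

-- the 'max(findLevel(dep, visiting) for dep in usesRelationsMap[node])' generator loop:
-- incremental max (none = no element seen yet), threading the memo; `rec` is findLevel
def depsFoldA (rec : String → List (String × Int) → Option (Int × List (String × Int))) :
    List String → Option Int → List (String × Int) → Option (Option Int × List (String × Int))
  | [], acc, memo => some (acc, memo)
  | d :: ds, acc, memo =>
    match rec d memo with
    | none => none
    | some (v, memo') =>
      depsFoldA rec ds (some (match acc with | none => v | some a => max a v)) memo'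

-- findLevel: fuel makes the recursion total; `none` = the Python raises (cycle ValueError,
-- KeyError, or fuel exhausted — fuel m.length+3 is never exhausted on inputs in Pre_)
def findLevelA (m : List (String × List String)) (ext : List String) :
    Nat → String → List (String × Int) → List String → Option (Int × List (String × Int))
  | 0, _, _, _ => none
  | f + 1, node, memo, path =>
    match pvLookup memo node with
    | some v => some (v, memo)
    | none =>
      if node ∈ path then none                                -- raise ValueError: cycle
      else if node ∈ ext then some (-1, pvInsert memo node (-1))
      else
        match pvLookup m node with
        | none => none                                        -- KeyError
        | some [] => some (0, pvInsert memo node 0)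
        | some (d :: ds) =>
          match depsFoldA (fun d' mm => findLevelA m ext f d' mm (node :: path)) (d :: ds) none memo with
          | none => none
          | some (none, _) => none                            -- unreachable: deps nonempty
          | some (some mx, memo1) => some (mx + 1, pvInsert memo1 node (mx + 1))

def loopA (m : List (String × List String)) (ext : List String) (F : Nat) :
    List String → List (String × Int) → Option (List (String × Int))
  | [], memo => some memo
  | k :: ks, memo =>
    match findLevelA m ext F k memo [] with
    | none => none
    | some (_, memo') => loopA m ext F ks memo'

def findNodeLevels (usesRelationsMap : List (String × List String)) (externalPages : List String) : List (String × Int) :=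
  match loopA usesRelationsMap externalPages (usesRelationsMap.length + 3) (usesRelationsMap.map Prod.fst) [] with
  | none => []                                                -- the Python raises here (outside Pre_)
  | some memo => memo

-- ===== PORT B =====
-- phase-1 state: (order, done); the `for d in usesRelationsMap[n]: visit(d)` loop, `rec` = visit
def visitFoldB (rec : String → List String × List String → Option (List String × List String)) :
    List String → List String × List String → Option (List String × List String)
  | [], st => some st
  | d :: ds, st =>
    match rec d st with
    | none => none
    | some st' => visitFoldB rec ds st'

def visitB (m : List (String × List String)) (ext : List String) :
    Nat → String → List String × List String → Option (List String × List String)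
  | 0, _, _ => none
  | f + 1, n, st =>
    if n ∈ st.2 then some st
    else
      match (if n ∈ ext then some st
             else match pvLookup m n with
               | none => none                                 -- KeyError
               | some deps => visitFoldB (fun d st' => visitB m ext f d st') deps st) with
      | none => none
      | some st' => some (st'.1 ++ [n], if n ∈ st'.2 then st'.2 else st'.2 ++ [n])

def loopB (m : List (String × List String)) (ext : List String) (F : Nat) :
    List String → List String × List String → Option (List String × List String)
  | [], st => some st
  | k :: ks, st =>
    match visitB m ext F k st with
    | none => none
    | some st' => loopB m ext F ks st'

-- the 'max(levels[d] for d in usesRelationsMap[n])' generator of phase 2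
def maxLevelsB (levels : List (String × Int)) : List String → Option Int → Option (Option Int)
  | [], acc => some acc
  | d :: ds, acc =>
    match pvLookup levels d with
    | none => none                                            -- KeyError
    | some v => maxLevelsB levels ds (some (match acc with | none => v | some a => max a v))

-- one iteration of phase 2's `for n in order`
def levelOfB (m : List (String × List String)) (ext : List String)
    (levels : List (String × Int)) (n : String) : Option (List (String × Int)) :=
  if n ∈ ext then some (pvInsert levels n (-1))
  else
    match pvLookup m n with
    | none => none                                            -- KeyError
    | some [] => some (pvInsert levels n 0)
    | some (d :: ds) =>
      match maxLevelsB levels (d :: ds) none with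
      | none => none
      | some none => none                                     -- unreachable: deps nonempty
      | some (some mx) => some (pvInsert levels n (mx + 1))

def phase2B (m : List (String × List String)) (ext : List String) :
    List String → List (String × Int) → Option (List (String × Int))
  | [], levels => some levels
  | n :: rest, levels =>
    match levelOfB m ext levels n with
    | none => none
    | some levels' => phase2B m ext rest levels'

def findNodeLevels_alt (usesRelationsMap : List (String × List String)) (externalPages : List String) : List (String × Int) :=
  match loopB usesRelationsMap externalPages (usesRelationsMap.length + 3) (usesRelationsMap.map Prod.fst) ([], []) with
  | none => []                                                -- the Python raises here (outside Pre_)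
  | some st => (phase2B usesRelationsMap externalPages st.1 []).getD []

-- ===== PRECONDITION & SPEC =====
-- Kahn-style peeling: after enough rounds, the set of keys whose whole dependency cone is resolvable
def peelStep (m : List (String × List String)) (ext : List String) (P : List String) : List String :=
  (m.filter (fun p =>
    decide (p.1 ∈ ext) || p.2.all (fun d => decide (d ∈ ext) || decide (d ∈ P)))).map Prod.fst

def peel (m : List (String × List String)) (ext : List String) : Nat → List String
  | 0 => []
  | i + 1 => peelStep m ext (peel m ext i)

-- Pre_ excludes exactly (i) the inputs on which A raises — ValueError on a dependency cycle, or
-- KeyError on a dependency that is neither a map key nor external: precisely the maps in which some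
-- key never enters the peel fixpoint — and (ii) duplicate-key association lists, which no Python
-- dict input can represent (a dict's keys are unique).
def Pre_findNodeLevels (usesRelationsMap : List (String × List String)) (externalPages : List String) : Prop :=
  (usesRelationsMap.map Prod.fst).Nodup ∧
  ∀ k ∈ usesRelationsMap.map Prod.fst, k ∈ peel usesRelationsMap externalPages (usesRelationsMap.length + 1)

instance (usesRelationsMap : List (String × List String)) (externalPages : List String) : Decidable (Pre_findNodeLevels usesRelationsMap externalPages) := by
  unfold Pre_findNodeLevels; infer_instance

def pvWitness_findNodeLevels : (List (String × List String)) × List String :=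
  ([("a", ["b", "x"]), ("b", [])], ["x"])

def Spec_findNodeLevels (usesRelationsMap : List (String × List String)) (externalPages : List String) (out : List (String × Int)) : Prop := out = findNodeLevels_alt usesRelationsMap externalPages
instance (usesRelationsMap : List (String × List String)) (externalPages : List String) (out : List (String × Int)) : Decidable (Spec_findNodeLevels usesRelationsMap externalPages out) := by unfold Spec_findNodeLevels; infer_instance

-- ===== CLAIM (what is proved, stated in full; the proofs are below) =====
def Claim_equal_findNodeLevels : Prop := ∀ (usesRelationsMap : List (String × List String)) (externalPages : List String), Dom_findNodeLevels usesRelationsMap externalPages → Pre_findNodeLevels usesRelationsMap externalPages → Spec_findNodeLevels usesRelationsMap externalPages (findNodeLevels usesRelationsMap externalPages)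

-- ===== LEMMAS AND PROOFS =====

theorem pvWitness_ok : Dom_findNodeLevels (pvWitness_findNodeLevels.1) (pvWitness_findNodeLevels.2) ∧ Pre_findNodeLevels (pvWitness_findNodeLevels.1) (pvWitness_findNodeLevels.2) := by
  constructor <;> decide

theorem pvLookup_append_some {α : Type} {l : List (String × α)} {x : String} {v : α}
    (h : pvLookup l x = some v) (t : List (String × α)) : pvLookup (l ++ t) x = some v := by
  induction l with
  | nil => simp [pvLookup] at h
  | cons p l ih =>
    obtain ⟨k, w⟩ := p
    simp only [pvLookup, List.cons_append] at h ⊢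
    by_cases hk : k = x
    · rw [if_pos hk] at h ⊢; exact h
    · rw [if_neg hk] at h ⊢; exact ih h

theorem pvLookup_append_none {α : Type} {l : List (String × α)} {x : String}
    (h : pvLookup l x = none) (t : List (String × α)) : pvLookup (l ++ t) x = pvLookup t x := by
  induction l with
  | nil => simp
  | cons p l ih =>
    obtain ⟨k, w⟩ := p
    simp only [pvLookup, List.cons_append] at h ⊢
    by_cases hk : k = x
    · rw [if_pos hk] at h; simp at h
    · rw [if_neg hk] at h ⊢; exact ih h

theorem mem_map_fst_iff {α : Type} (l : List (String × α)) (x : String) :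
    x ∈ l.map Prod.fst ↔ (pvLookup l x).isSome := by
  induction l with
  | nil => simp [pvLookup]
  | cons p l ih =>
    obtain ⟨k, w⟩ := p
    simp only [List.map_cons, List.mem_cons, pvLookup]
    by_cases hk : k = x
    · subst hk; simp
    · simp [hk, Ne.symm hk, ih]

theorem pvInsert_of_none {α : Type} {l : List (String × α)} {k : String}
    (h : pvLookup l k = none) (v : α) : pvInsert l k v = l ++ [(k, v)] := by
  induction l with
  | nil => simp [pvInsert]
  | cons p l ih =>
    obtain ⟨k', w⟩ := p
    simp only [pvLookup] at h
    split at h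
    · simp at h
    · simp only [pvInsert, List.cons_append, *]
      simp_all

def pvExtends (a b : List (String × Int)) : Prop := ∃ t, b = a ++ t

theorem pvExtends_refl (a : List (String × Int)) : pvExtends a a := ⟨[], by simp⟩

theorem pvExtends_trans {a b c : List (String × Int)} (h1 : pvExtends a b) (h2 : pvExtends b c) :
    pvExtends a c := by
  obtain ⟨t1, rfl⟩ := h1; obtain ⟨t2, rfl⟩ := h2; exact ⟨t1 ++ t2, by simp⟩

theorem pvLookup_of_extends {a b : List (String × Int)} {x : String} {v : Int}
    (h : pvExtends a b) (hv : pvLookup a x = some v) : pvLookup b x = some v := by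
  obtain ⟨t, rfl⟩ := h; exact pvLookup_append_some hv t

theorem peelStep_mono {m : List (String × List String)} {ext : List String} {P Q : List String}
    (h : ∀ x ∈ P, x ∈ Q) : ∀ x ∈ peelStep m ext P, x ∈ peelStep m ext Q := by
  intro x hx
  simp only [peelStep, List.mem_map, List.mem_filter, Bool.or_eq_true, decide_eq_true_eq,
    List.all_eq_true] at hx ⊢
  obtain ⟨p, ⟨hp, hc⟩, rfl⟩ := hx
  refine ⟨p, ⟨hp, ?_⟩, rfl⟩
  rcases hc with h1 | h1
  · exact Or.inl h1
  · refine Or.inr fun d hd => ?_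
    rcases h1 d hd with h2 | h2
    · exact Or.inl h2
    · exact Or.inr (h d h2)

theorem pvLookup_of_mem_nodup {m : List (String × List String)}
    (hN : (m.map Prod.fst).Nodup) {n : String} {ds : List String}
    (hmem : (n, ds) ∈ m) : pvLookup m n = some ds := by
  induction m with
  | nil => simp at hmem
  | cons p t ih =>
    obtain ⟨k, w⟩ := p
    simp only [List.map_cons, List.nodup_cons] at hN
    rcases List.mem_cons.1 hmem with heq | hmem'
    · cases heq; simp [pvLookup]
    · have hkn : k ≠ n := by
        rintro rfl
        exact hN.1 (List.mem_map.2 ⟨(k, ds), hmem', rfl⟩)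
      simp only [pvLookup, if_neg hkn]
      exact ih hN.2 hmem' 

theorem peel_succ_subset (m : List (String × List String)) (ext : List String) :
    ∀ i, ∀ x ∈ peel m ext i, x ∈ peel m ext (i + 1) := by
  intro i
  induction i with
  | zero => intro x hx; simp [peel] at hx
  | succ j ih =>
    intro x hx
    exact peelStep_mono ih x hx

theorem peel_subset_of_le {m : List (String × List String)} {ext : List String} {i j : Nat}
    (h : i ≤ j) : ∀ x ∈ peel m ext i, x ∈ peel m ext j := by
  intro x hx
  obtain ⟨k, rfl⟩ := Nat.exists_eq_add_of_le h
  clear h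
  induction k with
  | zero => exact hx
  | succ t ih =>
    rw [Nat.add_succ]
    exact peel_succ_subset m ext (i + t) x ih

theorem peel_minimal {m : List (String × List String)} {ext : List String} {n : String} {i : Nat}
    (h : n ∈ peel m ext i) : ∃ j, j ≤ i ∧ n ∈ peel m ext j ∧ ∀ l, l < j → n ∉ peel m ext l := by
  induction i using Nat.strong_induction_on with
  | _ i IH =>
    by_cases hall : ∀ l, l < i → n ∉ peel m ext l
    · exact ⟨i, le_refl i, h, hall⟩
    · have hall' : ∃ l, l < i ∧ n ∈ peel m ext l := by
        by_contra hc
        exact hall fun l hl hnl => hc ⟨l, hl, hnl⟩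
      obtain ⟨l, hl, hnl⟩ := hall'
      obtain ⟨j, hj1, hj2, hj3⟩ := IH l hl hnl
      exact ⟨j, by omega, hj2, hj3⟩

theorem peel_elim {m : List (String × List String)} {ext : List String} {n : String} {j : Nat}
    (h : n ∈ peel m ext (j + 1)) :
    ∃ ds, (n, ds) ∈ m ∧ (n ∈ ext ∨ ∀ d ∈ ds, d ∈ ext ∨ d ∈ peel m ext j) := by
  simp only [peel, peelStep, List.mem_map, List.mem_filter, Bool.or_eq_true, decide_eq_true_eq,
    List.all_eq_true] at h
  obtain ⟨⟨n', ds⟩, ⟨hmem, hc⟩, rfl⟩ := h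
  refine ⟨ds, hmem, ?_⟩
  rcases hc with h1 | h1
  · exact Or.inl h1
  · refine Or.inr fun d hd => ?_
    rcases h1 d hd with h2 | h2
    · exact Or.inl h2
    · exact Or.inr h2

theorem phase2B_append (m : List (String × List String)) (ext : List String) :
    ∀ (o1 o2 : List String) (lv : List (String × Int)),
      phase2B m ext (o1 ++ o2) lv =
        (phase2B m ext o1 lv).bind (fun lv' => phase2B m ext o2 lv') := by
  intro o1
  induction o1 with
  | nil => intro o2 lv; simp [phase2B]
  | cons x o1 ih =>
    intro o2 lv
    simp only [List.cons_append, phase2B]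
    cases levelOfB m ext lv x with
    | none => simp
    | some lv' => simpa using ih o2 lv'

def InvB (m : List (String × List String)) (ext : List String) (memo : List (String × Int)) : Prop :=
  phase2B m ext (memo.map Prod.fst) [] = some memo

theorem maxLevelsB_some_init {lv : List (String × Int)} :
    ∀ (ds : List String) (a : Int) (r : Option Int),
      maxLevelsB lv ds (some a) = some r → ∃ mx, r = some mx := by
  intro ds
  induction ds with
  | nil =>
    intro a r h
    have h' : (some (some a) : Option (Option Int)) = some r := h
    exact ⟨a, by injection h' with h''; exact h''.symm⟩
  | cons d ds ih =>
    intro a r h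
    simp only [maxLevelsB] at h
    cases hc : pvLookup lv d with
    | none => rw [hc] at h; simp at h
    | some v => rw [hc] at h; exact ih _ _ h

def MainP (m : List (String × List String)) (ext : List String) (i : Nat) : Prop :=
  ∀ n f memo path,
    (n ∈ ext ∨ (n ∈ peel m ext i ∧ ∀ l, l < i → n ∉ peel m ext l)) →
    (∀ p ∈ path, p ∉ ext ∧ p ∉ peel m ext i) →
    InvB m ext memo →
    i < f →
    ∃ memo' v,
      findLevelA m ext f n memo path = some (v, memo') ∧
      visitB m ext f n (memo.map Prod.fst, memo.map Prod.fst) =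
        some (memo'.map Prod.fst, memo'.map Prod.fst) ∧
      pvExtends memo memo' ∧
      pvLookup memo' n = some v ∧
      InvB m ext memo' ∧
      (∀ x ∈ memo'.map Prod.fst, x ∈ memo.map Prod.fst ∨ x ∈ ext ∨ x ∈ peel m ext i)

theorem foldMain (m : List (String × List String)) (ext : List String) (j : Nat)
    (H : ∀ i', i' ≤ j → MainP m ext i') :
    ∀ (ds : List String) (f : Nat) (path : List String), j < f →
    (∀ d ∈ ds, d ∈ ext ∨ d ∈ peel m ext j) →
    (∀ p ∈ path, p ∉ ext ∧ p ∉ peel m ext j) →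
    ∀ (acc : Option Int) (memo : List (String × Int)), InvB m ext memo →
    ∃ memo' acc',
      depsFoldA (fun d' mm => findLevelA m ext f d' mm path) ds acc memo = some (acc', memo') ∧
      visitFoldB (fun d st => visitB m ext f d st) ds (memo.map Prod.fst, memo.map Prod.fst) =
        some (memo'.map Prod.fst, memo'.map Prod.fst) ∧
      pvExtends memo memo' ∧
      InvB m ext memo' ∧
      maxLevelsB memo' ds acc = some acc' ∧
      (∀ x ∈ memo'.map Prod.fst, x ∈ memo.map Prod.fst ∨ x ∈ ext ∨ x ∈ peel m ext j) := by
  intro ds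
  induction ds with
  | nil =>
    intro f path hf hds hpath acc memo hinv
    exact ⟨memo, acc, by simp [depsFoldA], by simp [visitFoldB], pvExtends_refl memo,
      hinv, by simp [maxLevelsB], fun x hx => Or.inl hx⟩
  | cons d ds ih =>
    intro f path hf hds hpath acc memo hinv
    have hd := hds d (by simp)
    have hstep : ∃ memo1 v,
        findLevelA m ext f d memo path = some (v, memo1) ∧
        visitB m ext f d (memo.map Prod.fst, memo.map Prod.fst) =
          some (memo1.map Prod.fst, memo1.map Prod.fst) ∧
        pvExtends memo memo1 ∧
        pvLookup memo1 d = some v ∧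
        InvB m ext memo1 ∧
        (∀ x ∈ memo1.map Prod.fst, x ∈ memo.map Prod.fst ∨ x ∈ ext ∨ x ∈ peel m ext j) := by
      rcases hd with hd | hd
      · obtain ⟨memo1, v, h1, h2, h3, h4, h5, h6⟩ :=
          H 0 (Nat.zero_le j) d f memo path (Or.inl hd)
            (fun p hp => ⟨(hpath p hp).1, by simp [peel]⟩) hinv (by omega)
        exact ⟨memo1, v, h1, h2, h3, h4, h5, fun x hx => by
          rcases h6 x hx with h | h | h
          · exact Or.inl h
          · exact Or.inr (Or.inl h)
          · simp [peel] at h⟩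
      · obtain ⟨jd, hjd, hin, hmin⟩ := peel_minimal hd
        obtain ⟨memo1, v, h1, h2, h3, h4, h5, h6⟩ :=
          H jd hjd d f memo path (Or.inr ⟨hin, hmin⟩)
            (fun p hp => ⟨(hpath p hp).1, fun hc => (hpath p hp).2 (peel_subset_of_le hjd p hc)⟩)
            hinv (by omega)
        exact ⟨memo1, v, h1, h2, h3, h4, h5, fun x hx => by
          rcases h6 x hx with h | h | h
          · exact Or.inl h
          · exact Or.inr (Or.inl h)
          · exact Or.inr (Or.inr (peel_subset_of_le hjd x h))⟩
    obtain ⟨memo1, v, hA1, hB1, hext1, hlook1, hinv1, hbound1⟩ := hstep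
    obtain ⟨memo', acc', hA2, hB2, hext2, hinv2, hmax2, hbound2⟩ :=
      ih f path hf (fun d' hd' => hds d' (by simp [hd'])) hpath
        (some (match acc with | none => v | some a => max a v)) memo1 hinv1
    refine ⟨memo', acc', ?_, ?_, pvExtends_trans hext1 hext2, hinv2, ?_, ?_⟩
    · simp only [depsFoldA, hA1]; exact hA2
    · simp only [visitFoldB, hB1]; exact hB2
    · have hld : pvLookup memo' d = some v := pvLookup_of_extends hext2 hlook1
      simp only [maxLevelsB, hld]
      exact hmax2
    · intro x hx
      rcases hbound2 x hx with h | h | h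
      · rcases hbound1 x h with h' | h' | h'
        · exact Or.inl h'
        · exact Or.inr (Or.inl h')
        · exact Or.inr (Or.inr h')
      · exact Or.inr (Or.inl h)
      · exact Or.inr (Or.inr h)

theorem mainP_all (m : List (String × List String)) (ext : List String)
    (hN : (m.map Prod.fst).Nodup) :
    ∀ i, MainP m ext i := by
  intro i
  induction i using Nat.strong_induction_on with
  | _ i IH =>
  intro n f memo path hn hpath hinv hf
  obtain ⟨f', rfl⟩ : ∃ f', f = f' + 1 := ⟨f - 1, by omega⟩
  cases hmem : pvLookup memo n with
  | some v =>
    have hmemB : n ∈ memo.map Prod.fst := (mem_map_fst_iff _ _).2 (by simp [hmem])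
    exact ⟨memo, v, by simp [findLevelA, hmem], by simp [visitB, hmemB], pvExtends_refl memo,
      hmem, hinv, fun x hx => Or.inl hx⟩
  | none =>
    have hnotmem : n ∉ memo.map Prod.fst := by rw [mem_map_fst_iff]; simp [hmem]
    have hnp : n ∉ path := by
      intro hp
      rcases hpath n hp with ⟨hne, hnpe⟩
      rcases hn with h | ⟨h, _⟩
      · exact hne h
      · exact hnpe h
    have hmapfst : ∀ (w : Int), (memo ++ [(n, w)]).map Prod.fst = memo.map Prod.fst ++ [n] := by
      intro w; simp
    by_cases hext : n ∈ ext
    · refine ⟨memo ++ [(n, -1)], -1, ?_, ?_, ⟨[(n, -1)], rfl⟩, ?_, ?_, ?_⟩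
      · simp [findLevelA, hmem, hnp, hext, pvInsert_of_none hmem]
      · simp [visitB, hnotmem, hext]
      · rw [pvLookup_append_none hmem]; simp [pvLookup]
      · unfold InvB
        rw [hmapfst, phase2B_append]
        unfold InvB at hinv
        rw [hinv]
        simp [phase2B, levelOfB, hext, pvInsert_of_none hmem]
      · intro x hx
        rw [hmapfst] at hx
        rcases List.mem_append.1 hx with h | h
        · exact Or.inl h
        · simp at h; subst h; exact Or.inr (Or.inl hext)
    · rcases hn with h | ⟨hpi, hmin⟩
      · exact absurd h hext
      cases i with
      | zero => simp [peel] at hpi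
      | succ j =>
        obtain ⟨ds0, hmemds, hcond⟩ := peel_elim hpi
        rcases hcond with h | hall'
        · exact absurd h hext
        have hds : pvLookup m n = some ds0 := pvLookup_of_mem_nodup hN hmemds
        cases ds0 with
        | nil =>
          refine ⟨memo ++ [(n, 0)], 0, ?_, ?_, ⟨[(n, 0)], rfl⟩, ?_, ?_, ?_⟩
          · simp [findLevelA, hmem, hnp, hext, hds, pvInsert_of_none hmem]
          · simp [visitB, hnotmem, hext, hds, visitFoldB]
          · rw [pvLookup_append_none hmem]; simp [pvLookup]
          · unfold InvB
            rw [hmapfst, phase2B_append]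
            unfold InvB at hinv
            rw [hinv]
            simp [phase2B, levelOfB, hext, hds, pvInsert_of_none hmem]
          · intro x hx
            rw [hmapfst] at hx
            rcases List.mem_append.1 hx with h | h
            · exact Or.inl h
            · simp at h; subst h; exact Or.inr (Or.inr hpi)
        | cons d dtl =>
          have hpath' : ∀ p ∈ (n :: path), p ∉ ext ∧ p ∉ peel m ext j := by
            intro p hp
            rcases List.mem_cons.1 hp with rfl | hp
            · exact ⟨hext, hmin j (by omega)⟩
            · exact ⟨(hpath p hp).1, fun hc => (hpath p hp).2 (peel_succ_subset m ext j p hc)⟩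
          obtain ⟨memo1, acc', hAf, hBf, hext1, hinv1, hmax, hbound1⟩ :=
            foldMain m ext j (fun i' hi' => IH i' (by omega)) (d :: dtl) f' (n :: path)
              (by omega) hall' hpath' none memo hinv
          obtain ⟨mx, rfl⟩ : ∃ mx, acc' = some mx := by
            simp only [maxLevelsB] at hmax
            cases hc : pvLookup memo1 d with
            | none => rw [hc] at hmax; simp at hmax
            | some v => rw [hc] at hmax; exact maxLevelsB_some_init _ _ _ hmax
          have hn1 : pvLookup memo1 n = none := by
            cases hc : pvLookup memo1 n with
            | none => rfl
            | some w =>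
              exfalso
              have hnmem1 : n ∈ memo1.map Prod.fst := (mem_map_fst_iff _ _).2 (by simp [hc])
              rcases hbound1 n hnmem1 with h | h | h
              · exact hnotmem h
              · exact hext h
              · exact hmin j (by omega) h
          have hn1' : n ∉ memo1.map Prod.fst := by rw [mem_map_fst_iff]; simp [hn1]
          refine ⟨memo1 ++ [(n, mx + 1)], mx + 1, ?_, ?_, ?_, ?_, ?_, ?_⟩
          · simp [findLevelA, hmem, hnp, hext, hds, hAf, pvInsert_of_none hn1]
          · simp [visitB, hnotmem, hext, hds, hBf, hn1']
          · exact pvExtends_trans hext1 ⟨[(n, mx + 1)], rfl⟩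
          · rw [pvLookup_append_none hn1]; simp [pvLookup]
          · unfold InvB
            have hmapfst1 : (memo1 ++ [(n, mx + 1)]).map Prod.fst = memo1.map Prod.fst ++ [n] := by simp
            rw [hmapfst1, phase2B_append]
            unfold InvB at hinv1
            rw [hinv1]
            simp [phase2B, levelOfB, hext, hds, hmax, pvInsert_of_none hn1]
          · intro x hx
            have hmapfst1 : (memo1 ++ [(n, mx + 1)]).map Prod.fst = memo1.map Prod.fst ++ [n] := by simp
            rw [hmapfst1] at hx
            rcases List.mem_append.1 hx with h | h
            · rcases hbound1 x h with h' | h' | h'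
              · exact Or.inl h'
              · exact Or.inr (Or.inl h')
              · exact Or.inr (Or.inr (peel_succ_subset m ext j x h'))
            · simp at h; subst h; exact Or.inr (Or.inr hpi)

theorem loopMain (m : List (String × List String)) (ext : List String)
    (hN : (m.map Prod.fst).Nodup) :
    ∀ (ks : List String) (memo : List (String × Int)),
      (∀ k ∈ ks, k ∈ peel m ext (m.length + 1)) → InvB m ext memo →
      ∃ memo', loopA m ext (m.length + 3) ks memo = some memo' ∧
        loopB m ext (m.length + 3) ks (memo.map Prod.fst, memo.map Prod.fst) =
          some (memo'.map Prod.fst, memo'.map Prod.fst) ∧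
        InvB m ext memo' := by
  intro ks
  induction ks with
  | nil =>
    intro memo hks hinv
    exact ⟨memo, by simp [loopA], by simp [loopB], hinv⟩
  | cons k ks ih =>
    intro memo hks hinv
    obtain ⟨jk, hjk, hin, hmin⟩ := peel_minimal (hks k (by simp))
    obtain ⟨memo1, v, hA1, hB1, _, _, hinv1, _⟩ :=
      mainP_all m ext hN jk k (m.length + 3) memo [] (Or.inr ⟨hin, hmin⟩)
        (by simp) hinv (by omega)
    obtain ⟨memo', hA2, hB2, hinv2⟩ := ih memo1 (fun x hx => hks x (by simp [hx])) hinv1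
    exact ⟨memo', by simp [loopA, hA1, hA2], by simp [loopB, hB1, hB2], hinv2⟩

-- ===== VERDICT (by name: the statement is the Claim_ definition above) =====
theorem findNodeLevels_spec : Claim_equal_findNodeLevels := by
  intro m ext _ hpre
  show findNodeLevels m ext = findNodeLevels_alt m ext
  obtain ⟨memo', hA, hB, hinv⟩ :=
    loopMain m ext hpre.1 (m.map Prod.fst) [] hpre.2 (by simp [InvB, phase2B])
  unfold findNodeLevels findNodeLevels_alt
  rw [hA]
  have hB' : loopB m ext (m.length + 3) (m.map Prod.fst) ([], []) =
      some (memo'.map Prod.fst, memo'.map Prod.fst) := by simpa using hB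
  rw [hB']
  unfold InvB at hinv
  simp [hinv]
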